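-- pv_equiv track=rewrite | github.com/Sudhiksha-Mahesh/ORDINUS | backend/services/genetic_scheduler.py | _extra_block_has_internal_break
-- ===== SOURCE A (Python) =====
-- def _extra_block_has_internal_break(
--     break_after_slots: list[int] | None, start_slot: int, length: int
-- ) -> bool:
--     """True if a class break falls between two consecutive slots in [start, start+length)."""
--     if length <= 1 or not break_after_slots:
--         return False
--     for k in range(length - 1):
--         if _break_separates_lab(break_after_slots, start_slot + k):
--             return True
--     return False
--
-- def _break_separates_lab(break_after_slots: list[int], start_slot: int) -> bool:
--     """True if a break after (1-based) slot (start_slot+1) would sit between the two lab slots."""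
--     return (start_slot + 1) in break_after_slots
-- ===== SOURCE B (Python) =====
-- def _extra_block_has_internal_break(
--     break_after_slots, start_slot, length
-- ) -> bool:
--     """True if a class break falls strictly inside (start_slot, start_slot + length)."""
--     if not break_after_slots:
--         return False
--     return any(start_slot < b < start_slot + length for b in break_after_slots)
-- ===== Notes on version B (the rewrite author's own statement) =====
-- stated objective: simpler
-- what changed: Dropped the helper and the candidate-position loop over range(length-1); B makes a single pass over break_after_slots testing interval containment start_slot < b < start_slot + length (which subsumes the length <= 1 guard), removing the per-position list-membership scan.
import Mathlib
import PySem

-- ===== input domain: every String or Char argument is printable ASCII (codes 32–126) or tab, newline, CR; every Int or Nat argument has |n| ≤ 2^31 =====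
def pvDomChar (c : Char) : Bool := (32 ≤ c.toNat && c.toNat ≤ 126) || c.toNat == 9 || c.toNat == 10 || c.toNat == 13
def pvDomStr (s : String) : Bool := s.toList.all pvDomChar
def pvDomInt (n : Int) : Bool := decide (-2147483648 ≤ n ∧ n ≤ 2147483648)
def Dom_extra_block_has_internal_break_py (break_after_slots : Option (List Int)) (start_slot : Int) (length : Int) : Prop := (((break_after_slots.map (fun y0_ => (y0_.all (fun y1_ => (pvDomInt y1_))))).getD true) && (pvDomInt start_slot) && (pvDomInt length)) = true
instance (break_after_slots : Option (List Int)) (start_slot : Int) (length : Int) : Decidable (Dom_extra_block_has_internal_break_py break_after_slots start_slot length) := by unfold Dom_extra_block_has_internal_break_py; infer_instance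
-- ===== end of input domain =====

-- B replaces A's position loop (range(length-1) + per-position list-membership scan) by one pass over the breaks with an interval-containment test; objective: simpler.
-- breaks with an interval-containment test; objective: simpler.

-- ===== PORT A =====
def break_separates_lab_py (break_after_slots : List Int) (start_slot : Int) : Bool :=
  break_after_slots.contains (start_slot + 1)

def extra_block_has_internal_break_py (break_after_slots : Option (List Int)) (start_slot : Int) (length : Int) : Bool :=
  -- 'length <= 1 or not break_after_slots' : None and [] are both falsy
  if length ≤ 1 || (break_after_slots.getD []).isEmpty then false
  else (PySem.List.pyRange 0 (length - 1) 1).any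
    (fun k => break_separates_lab_py (break_after_slots.getD []) (start_slot + k))

-- ===== PORT B =====
def extra_block_has_internal_break_py_alt (break_after_slots : Option (List Int)) (start_slot : Int) (length : Int) : Bool :=
  -- 'if not break_after_slots: return False' : None and [] are both falsy
  if (break_after_slots.getD []).isEmpty then false
  else (break_after_slots.getD []).any
    (fun b => decide (start_slot < b) && decide (b < start_slot + length))

-- ===== PRECONDITION & SPEC =====
def Spec_extra_block_has_internal_break_py (break_after_slots : Option (List Int)) (start_slot : Int) (length : Int) (out : Bool) : Prop := out = extra_block_has_internal_break_py_alt break_after_slots start_slot length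
instance (break_after_slots : Option (List Int)) (start_slot : Int) (length : Int) (out : Bool) : Decidable (Spec_extra_block_has_internal_break_py break_after_slots start_slot length out) := by unfold Spec_extra_block_has_internal_break_py; infer_instance

-- ===== CLAIM (what is proved, stated in full; the proofs are below) =====
def Claim_equal_extra_block_has_internal_break_py : Prop := ∀ (break_after_slots : Option (List Int)) (start_slot : Int) (length : Int), Dom_extra_block_has_internal_break_py break_after_slots start_slot length → Spec_extra_block_has_internal_break_py break_after_slots start_slot length (extra_block_has_internal_break_py break_after_slots start_slot length)

-- ===== LEMMAS AND PROOFS =====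

theorem extra_block_core (xs : List Int) (s l : Int) :
    (if l ≤ 1 || xs.isEmpty then false
     else (PySem.List.pyRange 0 (l - 1) 1).any (fun k => break_separates_lab_py xs (s + k)))
    = (if xs.isEmpty then false
       else xs.any (fun b => decide (s < b) && decide (b < s + l))) := by
  rcases xs with _ | ⟨x, xs⟩
  · simp
  · simp only [List.isEmpty_cons, Bool.or_false, Bool.false_eq_true, if_false]
    by_cases hl : l ≤ 1
    · simp only [hl, decide_true, if_true]
      symm
      rw [List.any_eq_false]
      intro b _
      simp only [Bool.and_eq_true, decide_eq_true_eq, not_and]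
      omega
    · simp only [hl, decide_false, Bool.false_eq_true, if_false]
      rw [Bool.eq_iff_iff]
      rw [List.any_eq_true, List.any_eq_true]
      simp only [break_separates_lab_py, List.contains_eq_mem,
        PySem.List.mem_pyRange_one, decide_eq_true_eq, Bool.and_eq_true]
      constructor
      · rintro ⟨k, ⟨hk0, hkl⟩, hb⟩
        exact ⟨s + k + 1, hb, by omega, by omega⟩
      · rintro ⟨b, hb, h1, h2⟩
        exact ⟨b - s - 1, ⟨by omega, by omega⟩, by simpa [show s + (b - s - 1) + 1 = b from by omega] using hb⟩

-- ===== VERDICT (by name: the statement is the Claim_ definition above) =====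
theorem extra_block_has_internal_break_py_spec : Claim_equal_extra_block_has_internal_break_py := by
  intro bas s l _
  unfold Spec_extra_block_has_internal_break_py extra_block_has_internal_break_py extra_block_has_internal_break_py_alt
  exact extra_block_core (bas.getD []) s l
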